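-- pv_equiv track=rewrite | github.com/diothor/dcp-python | problems/number_problems/problem_740.py | regular_numbers
-- ===== SOURCE A (Python) =====
-- from typing import List
--
-- def regular_numbers(n: int) -> List[int]:
--     nums: List[int] = [1]
--     nums_size = 1
--
--     next_values = [2, 3, 5]
--     next_indexes = [0, 0, 0]
--
--     while nums_size < n:
--         next_num = min(next_values)
--         nums.append(next_num)
--         nums_size += 1
--         if next_num == next_values[0]:
--             next_indexes[0] += 1
--             next_values[0] = 2 * nums[next_indexes[0]]
--         if next_num == next_values[1]:
--             next_indexes[1] += 1
--             next_values[1] = 3 * nums[next_indexes[1]]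
--         if next_num == next_values[2]:
--             next_indexes[2] += 1
--             next_values[2] = 5 * nums[next_indexes[2]]
--     else:
--         return nums if n > 0 else []
-- ===== SOURCE B (Python) =====
-- from typing import List
--
-- def regular_numbers(n: int) -> List[int]:
--     # Priority-queue generator over one sorted candidate list: repeatedly take the
--     # smallest candidate (a head pointer walks the list), append it to the output,
--     # and put its 2x/3x/5x multiples back in sorted position (binary search over
--     # the active part; duplicates are skipped, so every candidate occurs once).
--     if n <= 0:
--         return []
--     out: List[int] = []
--     cand: List[int] = [1]
--     head = 0
--     while len(out) < n:
--         m = cand[head]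
--         head += 1
--         out.append(m)
--         for f in (2, 3, 5):
--             v = f * m
--             if v > cand[-1]:
--                 cand.append(v)
--                 continue
--             lo, hi = head, len(cand)
--             while lo < hi:
--                 mid = (lo + hi) // 2
--                 if cand[mid] < v:
--                     lo = mid + 1
--                 else:
--                     hi = mid
--             if cand[lo] != v:
--                 cand.insert(lo, v)
--     return out
-- ===== Notes on version B (the rewrite author's own statement) =====
-- stated objective: alternative
-- what changed: Replaced the three-pointer (Dijkstra) merge with its per-prime back-indexes into the output by a priority-queue generator: pop the minimum from a sorted duplicate-free candidate list and re-insert its 2x/3x/5x multiples.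
import Mathlib
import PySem

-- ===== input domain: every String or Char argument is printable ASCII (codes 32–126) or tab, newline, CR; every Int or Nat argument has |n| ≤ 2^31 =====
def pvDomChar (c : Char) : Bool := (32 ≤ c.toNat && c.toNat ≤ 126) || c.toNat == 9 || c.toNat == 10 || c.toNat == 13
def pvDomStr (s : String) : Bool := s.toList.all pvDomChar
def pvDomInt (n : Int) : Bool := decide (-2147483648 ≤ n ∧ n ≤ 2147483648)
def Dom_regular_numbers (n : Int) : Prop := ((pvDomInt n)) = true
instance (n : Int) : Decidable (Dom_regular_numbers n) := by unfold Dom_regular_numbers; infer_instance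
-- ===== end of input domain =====

-- B replaces A's three-pointer merge by a sorted-candidate-list (priority-queue) generator; alternative structure, not faster.


-- ===== PORT A =====
-- A's while loop; fuel = n - nums_size, which decreases by exactly 1 per pass.
-- nums[next_indexes[j]] is ported as pyGetD … 0: the index is always in range
-- (this follows from the invariant reg_Inv proved below), so the default is never used.
def regLoopA : Nat → List Int → Int × Int × Int → Int × Int × Int → List Int
  | 0, nums, _, _ => nums
  | fuel+1, nums, (v2, v3, v5), (i2, i3, i5) =>
    let next_num := (PySem.List.min? [v2, v3, v5] (fun y => y)).getD 0
    let nums' := nums ++ [next_num]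
    let p2 := if next_num = v2 then (i2 + 1, 2 * PySem.List.pyGetD nums' (i2 + 1) 0) else (i2, v2)
    let p3 := if next_num = v3 then (i3 + 1, 3 * PySem.List.pyGetD nums' (i3 + 1) 0) else (i3, v3)
    let p5 := if next_num = v5 then (i5 + 1, 5 * PySem.List.pyGetD nums' (i5 + 1) 0) else (i5, v5)
    regLoopA fuel nums' (p2.2, p3.2, p5.2) (p2.1, p3.1, p5.1)

def regular_numbers (n : Int) : List Int :=
  let nums := regLoopA (n - 1).toNat [1] (2, 3, 5) (0, 0, 0)
  if n > 0 then nums else []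

-- ===== PORT B =====
-- the binary search 'while lo < hi' loop; fuel = hi - lo at entry, an upper
-- bound on the iteration count (the interval shrinks by at least 1 per pass)
def regBSearch (cand : List Int) (v : Int) : Nat → Int → Int → Int
  | 0, lo, _ => lo
  | fuel+1, lo, hi =>
    if lo < hi then
      let mid := PySem.Int.floordiv (lo + hi) 2
      if PySem.List.pyGetD cand mid 0 < v then regBSearch cand v fuel (mid + 1) hi
      else regBSearch cand v fuel lo mid
    else lo

-- body of B's 'for f in (2, 3, 5)' loop (one insertion); cand[-1] and cand[lo]
-- are ported as pyGetD … 0: both indices are always in range (proved below)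
def regInsertB (cand : List Int) (head v : Int) : List Int :=
  if v > PySem.List.pyGetD cand (-1) 0 then cand ++ [v]
  else
    let lo := regBSearch cand v (PySem.List.len cand - head).toNat head (PySem.List.len cand)
    if PySem.List.pyGetD cand lo 0 ≠ v then PySem.List.insert cand lo v else cand

-- B's while loop; runs exactly n times (out grows by one per pass)
def regLoopB : Nat → List Int → List Int → Int → List Int
  | 0, out, _, _ => out
  | fuel+1, out, cand, head =>
    let m := PySem.List.pyGetD cand head 0
    let head' := head + 1
    regLoopB fuel (out ++ [m])
      (regInsertB (regInsertB (regInsertB cand head' (2*m)) head' (3*m)) head' (5*m)) head'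

def regular_numbers_alt (n : Int) : List Int :=
  if n ≤ 0 then [] else regLoopB n.toNat [] [1] 0

-- ===== PRECONDITION & SPEC =====
def Spec_regular_numbers (n : Int) (out : List Int) : Prop := out = regular_numbers_alt n
instance (n : Int) (out : List Int) : Decidable (Spec_regular_numbers n out) := by unfold Spec_regular_numbers; infer_instance

-- ===== CLAIM (what is proved, stated in full; the proofs are below) =====
def Claim_equal_regular_numbers : Prop := ∀ (n : Int), Dom_regular_numbers n → Spec_regular_numbers n (regular_numbers n)

-- ===== LEMMAS AND PROOFS =====

-- reference insertion (linear form of B's binary-search insert), used only in the proofs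
def regInsertSorted (v : Int) : List Int → List Int
  | [] => [v]
  | x :: xs => if x < v then x :: regInsertSorted v xs
               else if x = v then x :: xs
               else v :: x :: xs

-- invariant of A's per-prime state: i points at the first element of nums whose
-- p-multiple exceeds the last produced number, and v is that multiple
def reg_PInv (p : Int) (nums : List Int) (i v last : Int) : Prop :=
  ∃ j : Nat, i = (j : Int) ∧ j < nums.length ∧ v = p * nums.getD j 0 ∧
    (∀ k : Nat, k < j → p * nums.getD k 0 ≤ last) ∧ last < v

-- joint invariant tying A's state (nums, v's, i's) to B's state (out = nums, cand)
def reg_Inv (nums : List Int) (v2 v3 v5 i2 i3 i5 : Int) (cand : List Int) : Prop :=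
  nums.Pairwise (· < ·) ∧ (∀ a ∈ nums, 1 ≤ a) ∧
  ∃ last, nums.getLast? = some last ∧
    reg_PInv 2 nums i2 v2 last ∧ reg_PInv 3 nums i3 v3 last ∧ reg_PInv 5 nums i5 v5 last ∧
    cand.Pairwise (· < ·) ∧
    (∀ x, x ∈ cand ↔ ∃ a ∈ nums, (x = 2*a ∨ x = 3*a ∨ x = 5*a) ∧ last < x)

lemma reg_getD_mono {nums : List Int} (hs : nums.Pairwise (· < ·))
    {j k : Nat} (hjk : j ≤ k) (hk : k < nums.length) :
    nums.getD j 0 ≤ nums.getD k 0 := by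
  rw [List.getD_eq_getElem _ _ (by omega), List.getD_eq_getElem _ _ hk]
  rcases eq_or_lt_of_le hjk with rfl | h
  · exact le_refl _
  · exact le_of_lt (List.pairwise_iff_getElem.mp hs j k (by omega) hk h)

lemma reg_le_getLast {nums : List Int} (hs : nums.Pairwise (· < ·))
    {last : Int} (hl : nums.getLast? = some last) :
    ∀ a ∈ nums, a ≤ last := by
  induction nums with
  | nil => simp at hl
  | cons x xs ih =>
    rcases List.pairwise_cons.mp hs with ⟨hx, hxs⟩
    intro a ha
    cases xs with
    | nil =>
      simp at hl ha
      omega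
    | cons y ys =>
      rw [List.getLast?_cons_cons] at hl
      rcases List.mem_cons.mp ha with rfl | ha'
      · have : y ≤ last := ih hxs hl y (by simp)
        have := hx y (by simp)
        omega
      · exact ih hxs hl a ha'

lemma reg_mem_insertSorted {v x : Int} {l : List Int} :
    x ∈ regInsertSorted v l ↔ x = v ∨ x ∈ l := by
  induction l with
  | nil => simp [regInsertSorted]
  | cons y ys ih =>
    simp only [regInsertSorted]
    split_ifs with h1 h2
    · simp [ih]
      tauto
    · subst h2; simp
    · simp

lemma reg_insertSorted_pairwise {v : Int} {l : List Int} (hs : l.Pairwise (· < ·)) :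
    (regInsertSorted v l).Pairwise (· < ·) := by
  induction l with
  | nil => simp [regInsertSorted]
  | cons y ys ih =>
    rcases List.pairwise_cons.mp hs with ⟨hy, hys⟩
    simp only [regInsertSorted]
    split_ifs with h1 h2
    · refine List.pairwise_cons.mpr ⟨?_, ih hys⟩
      intro z hz
      rcases reg_mem_insertSorted.mp hz with rfl | hz'
      · exact h1
      · exact hy z hz'
    · exact hs
    · refine List.pairwise_cons.mpr ⟨?_, hs⟩
      intro z hz
      rcases List.mem_cons.mp hz with rfl | hz'
      · omega
      · have := hy z hz'
        omega

-- what B's binary search returns: a point of [lo, hi] with everything left of it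
-- below v and the point itself (if inside) not below v
lemma regBSearch_spec (cand : List Int) (v : Int) :
    ∀ (fuel : Nat) (lo hi : Int), 0 ≤ lo → lo ≤ hi → (hi - lo).toNat ≤ fuel →
    lo ≤ regBSearch cand v fuel lo hi ∧ regBSearch cand v fuel lo hi ≤ hi ∧
      (lo < regBSearch cand v fuel lo hi →
        PySem.List.pyGetD cand (regBSearch cand v fuel lo hi - 1) 0 < v) ∧
      (regBSearch cand v fuel lo hi < hi →
        v ≤ PySem.List.pyGetD cand (regBSearch cand v fuel lo hi) 0) := by
  intro fuel
  induction fuel with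
  | zero =>
    intro lo hi h0 hlh hf
    have : hi = lo := by omega
    subst this
    simp [regBSearch]
  | succ f ih =>
    intro lo hi h0 hlh hf
    rw [regBSearch]
    by_cases hlt : lo < hi
    · rw [if_pos hlt]
      have hmid1 : lo ≤ PySem.Int.floordiv (lo + hi) 2 :=
        (PySem.Int.floordiv_two_mid_bounds (le_of_lt hlt)).1
      have hmid2 : PySem.Int.floordiv (lo + hi) 2 < hi := by
        rw [PySem.Int.floordiv_lt_iff_lt_mul (by omega)]
        omega
      set mid := PySem.Int.floordiv (lo + hi) 2 with hmiddef
      by_cases hc : PySem.List.pyGetD cand mid 0 < v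
      · rw [if_pos hc]
        obtain ⟨ih1, ih2, ih3, ih4⟩ := ih (mid + 1) hi (by omega) (by omega) (by omega)
        refine ⟨by omega, ih2, ?_, ih4⟩
        intro _
        rcases eq_or_lt_of_le ih1 with heq | hlt2
        · rw [← heq]
          simpa using hc
        · exact ih3 hlt2
      · rw [if_neg hc]
        obtain ⟨ih1, ih2, ih3, ih4⟩ := ih lo mid (by omega) (by omega) (by omega)
        refine ⟨ih1, by omega, ih3, ?_⟩
        intro _
        rcases eq_or_lt_of_le ih2 with heq | hlt2
        · rw [heq]
          omega
        · exact ih4 hlt2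
    · rw [if_neg hlt]
      refine ⟨le_refl _, hlh, by omega, by omega⟩

lemma reg_insertSorted_of_forall_lt {v : Int} {l : List Int} (h : ∀ a ∈ l, a < v) :
    regInsertSorted v l = l ++ [v] := by
  induction l with
  | nil => rfl
  | cons x xs ih =>
    have hx : x < v := h x (by simp)
    simp only [regInsertSorted, if_pos hx, List.cons_append]
    rw [ih (fun a ha => h a (by simp [ha]))]

lemma reg_insertSorted_splice {v : Int} :
    ∀ (l : List Int) (k : Nat), k < l.length →
    (∀ j : Nat, j < k → l.getD j 0 < v) → v ≤ l.getD k 0 →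
    regInsertSorted v l
      = l.take k ++ (if l.getD k 0 = v then l.drop k else v :: l.drop k) := by
  intro l
  induction l with
  | nil => intro k hk; simp at hk
  | cons x xs ih =>
    intro k hk hlt hge
    cases k with
    | zero =>
      simp only [List.getD_cons_zero] at hge
      simp only [regInsertSorted, List.take_zero, List.drop_zero, List.nil_append,
        List.getD_cons_zero]
      rw [if_neg (show ¬ x < v by omega)]
    | succ k' =>
      have hx : x < v := hlt 0 (by omega)
      simp only [regInsertSorted, if_pos hx, List.length_cons] at hk ⊢
      rw [ih k' (by omega) (fun j hj => hlt (j+1) (by omega)) hge]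
      simp

-- B's in-place insertion equals the reference insertion on the active suffix
lemma reg_insertB_eq (pre act : List Int) (v : Int) (hpre : pre ≠ [])
    (hprelt : ∀ a ∈ pre, a < v) (hs : act.Pairwise (· < ·)) :
    regInsertB (pre ++ act) ((pre.length : Nat) : Int) v = pre ++ regInsertSorted v act := by
  have hcand : pre ++ act ≠ [] := by simp [hpre]
  have hlastD : PySem.List.pyGetD (pre ++ act) (-1) 0 = (pre ++ act).getLast hcand :=
    PySem.List.pyGetD_neg_one _ _ hcand
  by_cases hfast : (pre ++ act).getLast hcand < v
  · rw [regInsertB, if_pos (by rw [hlastD]; exact hfast)]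
    have hall : ∀ a ∈ act, a < v := by
      intro a ha
      cases hact : act with
      | nil => subst hact; simp at ha
      | cons y ys =>
        have hne : act ≠ [] := by simp [hact]
        have hgl : (pre ++ act).getLast hcand = act.getLast hne := by
          rw [List.getLast_append_of_ne_nil]
        have hl? : act.getLast? = some (act.getLast hne) := List.getLast?_eq_some_getLast _
        have := reg_le_getLast hs hl? a ha
        rw [hgl] at hfast
        omega
    rw [reg_insertSorted_of_forall_lt hall, List.append_assoc]
  · have hactne : act ≠ [] := by
      intro hnil
      subst hnil
      exact hfast (hprelt _ (by simpa using List.getLast_mem hcand))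
    have hgl : (pre ++ act).getLast hcand = act.getLast hactne := by
      rw [List.getLast_append_of_ne_nil]
    rw [regInsertB, if_neg (by rw [hlastD]; omega)]
    have hlen : PySem.List.len (pre ++ act) = ((pre ++ act).length : Int) := by
      simp [PySem.List.len_eq]
    obtain ⟨hr1, hr2, hr3, hr4⟩ :=
      regBSearch_spec (pre ++ act) v ((PySem.List.len (pre ++ act)) - (pre.length : Int)).toNat
        (pre.length : Int) (PySem.List.len (pre ++ act)) (by positivity)
        (by rw [hlen]; simp) (le_refl _)
    set r := regBSearch (pre ++ act) v ((PySem.List.len (pre ++ act)) - (pre.length : Int)).toNat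
        (pre.length : Int) (PySem.List.len (pre ++ act)) with hrdef
    rw [hlen] at hr2 hr4
    have hlenapp : (pre ++ act).length = pre.length + act.length := by simp
    -- r is strictly inside: index pre.length + (act.length - 1) holds the last of act, which is ≥ v
    have hrlt : r < ((pre ++ act).length : Int) := by
      rcases eq_or_lt_of_le hr2 with heq | h
      · exfalso
        have hprelt2 : (pre.length : Int) < r := by
          rw [heq]
          simp [hlenapp]
          have := List.length_pos_of_ne_nil hactne
          omega
        have := hr3 hprelt2
        rw [heq] at this
        have hidx : ((pre ++ act).length : Int) - 1 = (((pre ++ act).length - 1 : Nat) : Int) := by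
          have := List.length_pos_of_ne_nil hcand
          omega
        rw [hidx, PySem.List.pyGetD_natCast] at this
        have hgetlast : (pre ++ act).getD ((pre ++ act).length - 1) 0 = (pre ++ act).getLast hcand := by
          rw [List.getD_eq_getElem _ _ (by have := List.length_pos_of_ne_nil hcand; omega),
            List.getLast_eq_getElem]
        rw [hgetlast, hgl] at this
        have hl? : act.getLast? = some (act.getLast hactne) := List.getLast?_eq_some_getLast _
        omega
      · exact h
    -- write r as pre.length + k with k inside act
    obtain ⟨k, hkdef⟩ : ∃ k : Nat, r = ((pre.length + k : Nat) : Int) := by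
      refine ⟨(r - pre.length).toNat, ?_⟩
      omega
    have hkact : k < act.length := by omega
    have hrD : PySem.List.pyGetD (pre ++ act) r 0 = act.getD k 0 := by
      rw [hkdef, PySem.List.pyGetD_natCast, List.getD_append_right _ _ _ _ (by omega)]
      congr 1
      omega
    have hjlt : ∀ j : Nat, j < k → act.getD j 0 < v := by
      intro j hj
      have hk1 : (pre.length : Int) < r := by omega
      have := hr3 hk1
      have hidx : r - 1 = ((pre.length + (k - 1) : Nat) : Int) := by omega
      rw [hidx, PySem.List.pyGetD_natCast, List.getD_append_right _ _ _ _ (by omega)] at this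
      have heq : pre.length + (k - 1) - pre.length = k - 1 := by omega
      rw [heq] at this
      have := reg_getD_mono hs (show j ≤ k - 1 by omega) (show k - 1 < act.length by omega)
      omega
    have hge : v ≤ act.getD k 0 := by
      have := hr4 hrlt
      rw [hrD] at this
      exact this
    rw [reg_insertSorted_splice act k hkact hjlt hge]
    by_cases hkv : act.getD k 0 = v
    · rw [if_neg (by rw [hrD]; omega), if_pos hkv]
      simp
    · rw [if_pos (by rw [hrD]; omega), if_neg hkv, hkdef,
        PySem.List.insert_natCast _ _ _ (by simp; omega)]
      rw [List.take_append, List.drop_append]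
      simp [List.take_of_length_le (show pre.length ≤ pre.length + k by omega)]

-- the three insertions of one pass, pulled back through the inactive prefix
lemma reg_insertB_chain (pre rest : List Int) (m : Int) (hpre : pre ≠ [])
    (hple : ∀ a ∈ pre, a ≤ m) (hm : 1 ≤ m) (hs : rest.Pairwise (· < ·)) :
    regInsertB (regInsertB (regInsertB (pre ++ rest) ((pre.length : Nat) : Int) (2*m))
        ((pre.length : Nat) : Int) (3*m)) ((pre.length : Nat) : Int) (5*m)
      = pre ++ regInsertSorted (5*m) (regInsertSorted (3*m) (regInsertSorted (2*m) rest)) := by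
  have h2 : ∀ a ∈ pre, a < 2*m := fun a ha => by have := hple a ha; omega
  have h3 : ∀ a ∈ pre, a < 3*m := fun a ha => by have := hple a ha; omega
  have h5 : ∀ a ∈ pre, a < 5*m := fun a ha => by have := hple a ha; omega
  rw [reg_insertB_eq pre rest _ hpre h2 hs,
    reg_insertB_eq pre _ _ hpre h3 (reg_insertSorted_pairwise hs),
    reg_insertB_eq pre _ _ hpre h5 (reg_insertSorted_pairwise (reg_insertSorted_pairwise hs))]

-- the head of the candidate list is min(next_values), and bounds each v
lemma reg_head_eq {nums : List Int} {v2 v3 v5 i2 i3 i5 last m : Int} {rest : List Int}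
    (hs : nums.Pairwise (· < ·))
    (h2 : reg_PInv 2 nums i2 v2 last) (h3 : reg_PInv 3 nums i3 v3 last)
    (h5 : reg_PInv 5 nums i5 v5 last)
    (hcs : (m :: rest).Pairwise (· < ·))
    (hch : ∀ x, x ∈ (m :: rest) ↔ ∃ a ∈ nums, (x = 2*a ∨ x = 3*a ∨ x = 5*a) ∧ last < x) :
    min (min v2 v3) v5 = m ∧ m ≤ v2 ∧ m ≤ v3 ∧ m ≤ v5 := by
  obtain ⟨j2, _, hj2, hv2, hpre2, hlv2⟩ := h2
  obtain ⟨j3, _, hj3, hv3, hpre3, hlv3⟩ := h3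
  obtain ⟨j5, _, hj5, hv5, hpre5, hlv5⟩ := h5
  have hm_le : ∀ x ∈ (m :: rest), m ≤ x := by
    intro x hx
    rcases List.mem_cons.mp hx with rfl | hx'
    · exact le_refl _
    · exact le_of_lt ((List.pairwise_cons.mp hcs).1 x hx')
  have hmem : ∀ (p : Int) (j : Nat), j < nums.length → nums.getD j 0 ∈ nums := by
    intro p j hj
    rw [List.getD_eq_getElem _ _ hj]
    exact List.getElem_mem hj
  have hmv2 : m ≤ v2 :=
    hm_le v2 ((hch v2).mpr ⟨nums.getD j2 0, hmem 2 j2 hj2, Or.inl hv2, hlv2⟩)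
  have hmv3 : m ≤ v3 :=
    hm_le v3 ((hch v3).mpr ⟨nums.getD j3 0, hmem 3 j3 hj3, Or.inr (Or.inl hv3), hlv3⟩)
  have hmv5 : m ≤ v5 :=
    hm_le v5 ((hch v5).mpr ⟨nums.getD j5 0, hmem 5 j5 hj5, Or.inr (Or.inr hv5), hlv5⟩)
  obtain ⟨a, ha, hfac, hlm⟩ := (hch m).mp (List.mem_cons_self)
  obtain ⟨k, hk, rfl⟩ := List.mem_iff_getElem.mp ha
  rw [← List.getD_eq_getElem _ 0 hk] at hfac
  rcases hfac with h | h | h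
  · have hjk : j2 ≤ k := by
      by_contra hkj
      have := hpre2 k (by omega)
      omega
    have := reg_getD_mono hs hjk hk
    refine ⟨by omega, hmv2, hmv3, hmv5⟩
  · have hjk : j3 ≤ k := by
      by_contra hkj
      have := hpre3 k (by omega)
      omega
    have := reg_getD_mono hs hjk hk
    refine ⟨by omega, hmv2, hmv3, hmv5⟩
  · have hjk : j5 ≤ k := by
      by_contra hkj
      have := hpre5 k (by omega)
      omega
    have := reg_getD_mono hs hjk hk
    refine ⟨by omega, hmv2, hmv3, hmv5⟩

-- per-prime invariant is preserved by one step
lemma reg_PInv_step {p : Int} (hp : 2 ≤ p) {nums : List Int} {i v last m : Int}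
    (hs : nums.Pairwise (· < ·)) (hpos : ∀ a ∈ nums, 1 ≤ a)
    (hl : nums.getLast? = some last)
    (hP : reg_PInv p nums i v last) (hlm : last < m) (hmv : m ≤ v) :
    (v = m → reg_PInv p (nums ++ [m]) (i + 1) (p * PySem.List.pyGetD (nums ++ [m]) (i + 1) 0) m) ∧
    (v ≠ m → reg_PInv p (nums ++ [m]) i v m) := by
  obtain ⟨j, hi, hj, hv, hpre, hlv⟩ := hP
  have hlast_mem := List.mem_of_getLast? hl
  have hlast1 : 1 ≤ last := hpos last hlast_mem
  constructor
  · intro hvm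
    refine ⟨j + 1, by omega, by simp; omega, ?_, ?_, ?_⟩
    · have hcast : i + 1 = ((j + 1 : Nat) : Int) := by omega
      rw [hcast, PySem.List.pyGetD_natCast]
    · intro k hk
      rcases Nat.lt_or_ge k j with hkj | hkj
      · rw [List.getD_append _ _ _ _ (by omega)]
        have := hpre k hkj
        omega
      · have hkj' : k = j := by omega
        subst hkj'
        rw [List.getD_append _ _ _ _ hj]
        omega
    · have hcast : i + 1 = ((j + 1 : Nat) : Int) := by omega
      rw [hcast, PySem.List.pyGetD_natCast]
      rcases Nat.lt_or_ge (j + 1) nums.length with hlt | hge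
      · rw [List.getD_append _ _ _ _ hlt]
        have hmono := List.pairwise_iff_getElem.mp hs j (j + 1) hj hlt (by omega)
        rw [← List.getD_eq_getElem _ 0 hj, ← List.getD_eq_getElem _ 0 hlt] at hmono
        nlinarith
      · have hj1 : j + 1 = nums.length := by omega
        rw [hj1, List.getD_append_right _ _ _ _ (by omega)]
        simp
        nlinarith
  · intro hne
    refine ⟨j, hi, by simp; omega, ?_, ?_, by omega⟩
    · rw [List.getD_append _ _ _ _ hj]
      exact hv
    · intro k hk
      rw [List.getD_append _ _ _ _ (by omega)]
      have := hpre k hk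
      omega

-- the whole invariant is preserved by one parallel step of the two loops
lemma reg_Inv_step {nums : List Int} {v2 v3 v5 i2 i3 i5 m : Int} {rest : List Int}
    (hI : reg_Inv nums v2 v3 v5 i2 i3 i5 (m :: rest)) :
    reg_Inv (nums ++ [m])
      (if m = v2 then 2 * PySem.List.pyGetD (nums ++ [m]) (i2 + 1) 0 else v2)
      (if m = v3 then 3 * PySem.List.pyGetD (nums ++ [m]) (i3 + 1) 0 else v3)
      (if m = v5 then 5 * PySem.List.pyGetD (nums ++ [m]) (i5 + 1) 0 else v5)
      (if m = v2 then i2 + 1 else i2)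
      (if m = v3 then i3 + 1 else i3)
      (if m = v5 then i5 + 1 else i5)
      (regInsertSorted (5*m) (regInsertSorted (3*m) (regInsertSorted (2*m) rest))) := by
  obtain ⟨hs, hpos, last, hl, h2, h3, h5, hcs, hch⟩ := hI
  have hlast_mem := List.mem_of_getLast? hl
  have hlast1 : 1 ≤ last := hpos last hlast_mem
  obtain ⟨a0, ha0, hf0, hlm⟩ := (hch m).mp List.mem_cons_self
  have ha01 : 1 ≤ a0 := hpos a0 ha0
  have hm2 : 2 ≤ m := by rcases hf0 with h | h | h <;> omega
  obtain ⟨hmin, hmv2, hmv3, hmv5⟩ := reg_head_eq hs h2 h3 h5 hcs hch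
  have hrest_pw := (List.pairwise_cons.mp hcs).2
  have hrest_gt := (List.pairwise_cons.mp hcs).1
  have hle_last := reg_le_getLast hs hl
  refine ⟨?_, ?_, m, List.getLast?_concat, ?_, ?_, ?_, ?_, ?_⟩
  · refine List.pairwise_append.mpr ⟨hs, by simp, ?_⟩
    intro a ha b hb
    have hb' : b = m := by simpa using hb
    subst hb'
    have := hle_last a ha
    omega
  · intro a ha
    rcases List.mem_append.mp ha with ha' | ha'
    · exact hpos a ha'
    · have : a = m := by simpa using ha'
      omega
  · by_cases hm : m = v2
    · rw [if_pos hm, if_pos hm]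
      exact (reg_PInv_step (by norm_num) hs hpos hl h2 hlm hmv2).1 hm.symm
    · rw [if_neg hm, if_neg hm]
      exact (reg_PInv_step (by norm_num) hs hpos hl h2 hlm hmv2).2 (fun h => hm h.symm)
  · by_cases hm : m = v3
    · rw [if_pos hm, if_pos hm]
      exact (reg_PInv_step (by norm_num) hs hpos hl h3 hlm hmv3).1 hm.symm
    · rw [if_neg hm, if_neg hm]
      exact (reg_PInv_step (by norm_num) hs hpos hl h3 hlm hmv3).2 (fun h => hm h.symm)
  · by_cases hm : m = v5
    · rw [if_pos hm, if_pos hm]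
      exact (reg_PInv_step (by norm_num) hs hpos hl h5 hlm hmv5).1 hm.symm
    · rw [if_neg hm, if_neg hm]
      exact (reg_PInv_step (by norm_num) hs hpos hl h5 hlm hmv5).2 (fun h => hm h.symm)
  · exact reg_insertSorted_pairwise (reg_insertSorted_pairwise (reg_insertSorted_pairwise hrest_pw))
  · intro x
    simp only [reg_mem_insertSorted]
    constructor
    · rintro (rfl | rfl | rfl | hx)
      · exact ⟨m, List.mem_append.mpr (Or.inr (by simp)), Or.inr (Or.inr rfl), by omega⟩
      · exact ⟨m, List.mem_append.mpr (Or.inr (by simp)), Or.inr (Or.inl rfl), by omega⟩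
      · exact ⟨m, List.mem_append.mpr (Or.inr (by simp)), Or.inl rfl, by omega⟩
      · have hmx : m < x := hrest_gt x hx
        obtain ⟨a, ha, hf, _⟩ := (hch x).mp (List.mem_cons.mpr (Or.inr hx))
        exact ⟨a, List.mem_append.mpr (Or.inl ha), hf, hmx⟩
    · rintro ⟨a, ha, hf, hmx⟩
      rcases List.mem_append.mp ha with ha' | ha'
      · have hxc : x ∈ m :: rest := (hch x).mpr ⟨a, ha', hf, by omega⟩
        rcases List.mem_cons.mp hxc with rfl | hx'
        · omega
        · exact Or.inr (Or.inr (Or.inr hx'))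
      · have haa : a = m := by simpa using ha'
        subst haa
        rcases hf with rfl | rfl | rfl
        · exact Or.inr (Or.inr (Or.inl rfl))
        · exact Or.inr (Or.inl rfl)
        · exact Or.inl rfl

lemma reg_cand_ne_nil {nums : List Int} {v2 v3 v5 i2 i3 i5 : Int} {cand : List Int}
    (hI : reg_Inv nums v2 v3 v5 i2 i3 i5 cand) : cand ≠ [] := by
  obtain ⟨hs, hpos, last, hl, h2, h3, h5, hcs, hch⟩ := hI
  have hlast_mem := List.mem_of_getLast? hl
  have h1 : 1 ≤ last := hpos last hlast_mem
  have : 2 * last ∈ cand := (hch (2 * last)).mpr ⟨last, hlast_mem, Or.inl rfl, by omega⟩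
  intro hnil
  rw [hnil] at this
  simp at this

-- the two loops agree under the invariant: B's full candidate list is
-- "already-produced prefix ++ active sorted candidates", head points past the prefix
lemma reg_loop_eq : ∀ (fuel : Nat) (nums : List Int) (v2 v3 v5 i2 i3 i5 : Int) (cand : List Int),
    reg_Inv nums v2 v3 v5 i2 i3 i5 cand →
    regLoopA fuel nums (v2, v3, v5) (i2, i3, i5)
      = regLoopB fuel nums (nums ++ cand) ((nums.length : Nat) : Int) := by
  intro fuel
  induction fuel with
  | zero => intro nums v2 v3 v5 i2 i3 i5 cand _; rfl
  | succ f ih =>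
    intro nums v2 v3 v5 i2 i3 i5 cand hI
    obtain ⟨m, rest, rfl⟩ : ∃ m rest, cand = m :: rest := by
      cases cand with
      | nil => exact absurd rfl (reg_cand_ne_nil hI)
      | cons m rest => exact ⟨m, rest, rfl⟩
    have hIc := hI
    obtain ⟨hs, hpos, last, hl, h2, h3, h5, hcs, hch⟩ := hIc
    have hnext : (PySem.List.min? [v2, v3, v5] (fun y => y)).getD 0 = m := by
      rw [PySem.List.min?_id_cons]
      have := (reg_head_eq hs h2 h3 h5 hcs hch).1
      simpa [List.foldl] using this
    have hlast_mem := List.mem_of_getLast? hl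
    have hlast1 : 1 ≤ last := hpos last hlast_mem
    obtain ⟨a0, ha0, hf0, hlm⟩ := (hch m).mp List.mem_cons_self
    have ha01 : 1 ≤ a0 := hpos a0 ha0
    have hm2 : 2 ≤ m := by rcases hf0 with h | h | h <;> omega
    have hA : regLoopA (f + 1) nums (v2, v3, v5) (i2, i3, i5)
        = regLoopA f (nums ++ [m])
            (if m = v2 then 2 * PySem.List.pyGetD (nums ++ [m]) (i2 + 1) 0 else v2,
             if m = v3 then 3 * PySem.List.pyGetD (nums ++ [m]) (i3 + 1) 0 else v3,
             if m = v5 then 5 * PySem.List.pyGetD (nums ++ [m]) (i5 + 1) 0 else v5)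
            (if m = v2 then i2 + 1 else i2,
             if m = v3 then i3 + 1 else i3,
             if m = v5 then i5 + 1 else i5) := by
      simp only [regLoopA, hnext, apply_ite Prod.fst, apply_ite Prod.snd]
    rw [hA]
    have hmD : PySem.List.pyGetD (nums ++ m :: rest) ((nums.length : Nat) : Int) 0 = m := by
      rw [PySem.List.pyGetD_natCast, List.getD_append_right _ _ _ _ (le_refl _)]
      simp
    have hsplit : nums ++ m :: rest = (nums ++ [m]) ++ rest := by simp
    have hple : ∀ a ∈ nums ++ [m], a ≤ m := by
      intro a ha
      rcases List.mem_append.mp ha with ha' | ha'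
      · have := reg_le_getLast hs hl a ha'
        omega
      · have : a = m := by simpa using ha'
        omega
    have hcast : (nums.length : Int) + 1 = (((nums ++ [m]).length : Nat) : Int) := by
      simp
    have hB : regLoopB (f + 1) nums (nums ++ m :: rest) ((nums.length : Nat) : Int)
        = regLoopB f (nums ++ [m])
            ((nums ++ [m]) ++
              regInsertSorted (5*m) (regInsertSorted (3*m) (regInsertSorted (2*m) rest)))
            (((nums ++ [m]).length : Nat) : Int) := by
      simp only [regLoopB, hmD]
      rw [hcast, hsplit, reg_insertB_chain (nums ++ [m]) rest m (by simp) hple (by omega)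
        (List.pairwise_cons.mp hcs).2]
    rw [hB]
    exact ih _ _ _ _ _ _ _ _ (reg_Inv_step hI)

lemma reg_Inv_init : reg_Inv [1] 2 3 5 0 0 0 [2, 3, 5] := by
  refine ⟨by simp, by simp, 1, rfl, ?_, ?_, ?_, by decide, ?_⟩
  · exact ⟨0, rfl, by simp, by simp, by omega, by omega⟩
  · exact ⟨0, rfl, by simp, by simp, by omega, by omega⟩
  · exact ⟨0, rfl, by simp, by simp, by omega, by omega⟩
  · intro x
    simp
    omega

-- ===== VERDICT (by name: the statement is the Claim_ definition above) =====
theorem regular_numbers_spec : Claim_equal_regular_numbers := by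
  intro n _
  unfold Spec_regular_numbers regular_numbers regular_numbers_alt
  by_cases hn : n ≤ 0
  · simp [hn, show ¬ n > 0 by omega]
  · have hpos : 0 < n := by omega
    have ht : n.toNat = (n - 1).toNat + 1 := by omega
    simp only [show ¬ n ≤ 0 from hn, if_false, ht, show (0:Int) < n from hpos]
    have e1 : regInsertB [1] 1 2 = [1, 2] := by decide
    have e2 : regInsertB [1, 2] 1 3 = [1, 2, 3] := by decide
    have e3 : regInsertB [1, 2, 3] 1 5 = [1, 2, 3, 5] := by decide
    have hstep : regLoopB ((n - 1).toNat + 1) [] [1] 0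
        = regLoopB (n - 1).toNat [1] [1, 2, 3, 5] 1 := by
      simp only [regLoopB]
      norm_num [PySem.List.pyGetD_zero_cons, e1, e2, e3]
    rw [hstep]
    have := reg_loop_eq (n - 1).toNat [1] 2 3 5 0 0 0 [2, 3, 5] reg_Inv_init
    simpa using this
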